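-- pv_equiv track=rewrite | github.com/Amandin5527/scripts | pi_une_ligne_et_d_autres_trucs_cool.py | unSur
-- ===== SOURCE A (Python) =====
-- def unSur(d,D=100,T=5):
--     L=[0]*D #k
--     n=1 #denominateur (C LE MEME DENO)
--     for i in range(D):#nombre de paquets de m chiffres
--         for j in range(T): #nombre de chiffre dans un paquet
--             q = n//d
--             L[i]*=10 #ca decale tt vers la gauche
--             L[i]+=q #ca ajoute le quotient
--             n = (n-q*d)*10
--     return L
-- ===== SOURCE B (Python) =====
-- def unSur(d, D=100, T=5):
--     # One big division per group instead of T digit-by-digit divisions.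
--     if T <= 0 or D <= 0:
--         return [0] * D
--     p = 10 ** (T - 1)
--     L = []
--     n = 1
--     for _ in range(D):
--         L.append(n * p // d)
--         n = (n * p % d) * 10
--     return L
-- ===== Notes on version B (the rewrite author's own statement) =====
-- stated objective: faster
-- what changed: Replaces the inner per-digit loop (T single-digit division steps accumulating L[i] with repeated *10 shifts of a growing big integer) by one big-integer division per group: p=10**(T-1) is precomputed and each group is (n*p)//d with carry n=(n*p%d)*10, with T<=0 returning [0]*D directly.
import Mathlib
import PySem

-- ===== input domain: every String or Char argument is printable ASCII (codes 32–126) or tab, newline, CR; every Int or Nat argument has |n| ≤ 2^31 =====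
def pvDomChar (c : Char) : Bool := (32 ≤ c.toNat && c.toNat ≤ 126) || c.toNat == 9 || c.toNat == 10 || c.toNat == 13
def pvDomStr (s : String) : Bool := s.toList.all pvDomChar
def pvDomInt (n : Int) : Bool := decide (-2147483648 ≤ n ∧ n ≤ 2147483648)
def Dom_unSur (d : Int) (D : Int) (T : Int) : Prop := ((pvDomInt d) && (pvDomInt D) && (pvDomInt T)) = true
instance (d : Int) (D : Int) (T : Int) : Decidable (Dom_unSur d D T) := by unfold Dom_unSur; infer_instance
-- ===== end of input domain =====

-- B computes each T-digit group with one big division (n*p)//d, p = 10^(T-1), instead of A's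
-- T digit-by-digit division steps; objective: faster (one division per group).

-- ===== PORT A =====
def unSur (d : Int) (D : Int) (T : Int) : List Int :=
  let L0 : List Int := List.replicate D.toNat 0        -- L=[0]*D
  let res := (PySem.List.pyRange 0 D 1).foldl (fun (s : List Int × Int) i =>
      -- for j in range(T): q = n//d ; L[i] = L[i]*10 + q ; n = (n-q*d)*10
      let inner := (PySem.List.pyRange 0 T 1).foldl (fun (t : Int × Int) _ =>
          let q := PySem.Int.floordiv t.2 d
          (t.1 * 10 + q, (t.2 - q * d) * 10)) (PySem.List.pyGetD s.1 i 0, s.2)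
      (s.1.set i.toNat inner.1, inner.2)) (L0, 1)      -- i ∈ range(D) is ≥ 0: .toNat never clamps
  res.1

-- ===== PORT B =====
def unSur_alt (d : Int) (D : Int) (T : Int) : List Int :=
  if T ≤ 0 ∨ D ≤ 0 then List.replicate D.toNat 0      -- return [0]*D ([] when D ≤ 0)
  else
    let p : Int := 10 ^ (T - 1).toNat                  -- p = 10**(T-1), T ≥ 1 here
    let res := (PySem.List.pyRange 0 D 1).foldl (fun (s : List Int × Int) _ =>
        (s.1 ++ [PySem.Int.floordiv (s.2 * p) d], PySem.Int.mod (s.2 * p) d * 10))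
      (([] : List Int), 1)
    res.1

-- ===== PRECONDITION & SPEC =====
-- Pre_ excludes exactly the inputs where A raises ZeroDivisionError: d = 0 with both loops entered.
def Pre_unSur (d : Int) (D : Int) (T : Int) : Prop := d ≠ 0 ∨ D ≤ 0 ∨ T ≤ 0
instance (d : Int) (D : Int) (T : Int) : Decidable (Pre_unSur d D T) := by unfold Pre_unSur; infer_instance
def pvWitness_unSur : Int × Int × Int := (7, 5, 3)
def Spec_unSur (d : Int) (D : Int) (T : Int) (out : List Int) : Prop := out = unSur_alt d D T
instance (d : Int) (D : Int) (T : Int) (out : List Int) : Decidable (Spec_unSur d D T out) := by unfold Spec_unSur; infer_instance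

-- ===== CLAIM (what is proved, stated in full; the proofs are below) =====
def Claim_equal_unSur : Prop := ∀ (d : Int) (D : Int) (T : Int), Dom_unSur d D T → Pre_unSur d D T → Spec_unSur d D T (unSur d D T)

-- ===== LEMMAS AND PROOFS =====

-- the common "spine": group values and carried numerator, one group per entry
def pvSpine (d p : Int) : Nat → Int → List Int
  | 0, _ => []
  | k+1, n => PySem.Int.floordiv (n * p) d :: pvSpine d p k (PySem.Int.mod (n * p) d * 10)

def pvCarry (d p : Int) : Nat → Int → Int
  | 0, n => n
  | k+1, n => pvCarry d p k (PySem.Int.mod (n * p) d * 10)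

-- floor-division long-division step identities (any sign of d, d ≠ 0)
lemma pv_fdiv_ten (d N : Int) (hd : d ≠ 0) :
    Int.fdiv (10 * N) d = 10 * Int.fdiv N d + Int.fdiv (10 * Int.fmod N d) d := by
  have h : 10 * N = 10 * Int.fmod N d + d * (10 * Int.fdiv N d) := by
    have := Int.fmod_add_mul_fdiv N d
    linarith
  rw [h, Int.add_mul_fdiv_left _ _ hd]; ring

lemma pv_fmod_ten (d N : Int) :
    Int.fmod (10 * N) d = Int.fmod (10 * Int.fmod N d) d := by
  have h : 10 * N = 10 * Int.fmod N d + d * (10 * Int.fdiv N d) := by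
    have := Int.fmod_add_mul_fdiv N d
    linarith
  rw [h, Int.add_mul_fmod_self_left]

-- A's inner loop as an iterate
lemma pv_fold_const {α β : Type} (g : β → β) :
    ∀ (l : List α) (s : β), l.foldl (fun s _ => g s) s = g^[l.length] s
  | [], s => rfl
  | _ :: xs, s => by
    simp [List.foldl, pv_fold_const g xs (g s), Function.iterate_succ_apply]

-- closed form for t+1 digit steps of A's inner loop
lemma pv_inner_iter (d : Int) (hd : d ≠ 0) (t : Nat) :
    ∀ (Li n : Int),
      (fun (s : Int × Int) =>
        (s.1 * 10 + PySem.Int.floordiv s.2 d,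
         (s.2 - PySem.Int.floordiv s.2 d * d) * 10))^[t+1] (Li, n)
      = (Li * 10 ^ (t+1) + Int.fdiv (n * 10 ^ t) d, 10 * Int.fmod (n * 10 ^ t) d) := by
  induction t with
  | zero =>
    intro Li n
    simp [PySem.Int.floordiv, Int.fmod_def]
    ring
  | succ t ih =>
    intro Li n
    rw [Function.iterate_succ_apply', ih]
    simp only [PySem.Int.floordiv]
    have h10 : n * 10 ^ (t+1) = 10 * (n * 10 ^ t) := by ring
    rw [Prod.mk.injEq]
    refine ⟨?_, ?_⟩
    · rw [h10, pv_fdiv_ten d (n * 10 ^ t) hd]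
      ring
    · rw [h10, pv_fmod_ten d (n * 10 ^ t),
        Int.fmod_def (10 * Int.fmod (n * 10 ^ t) d) d]
      ring

-- A's inner loop result for one group (start digit accumulator 0)
lemma pv_inner_result (d T : Int) (hd : d ≠ 0) (hT : 0 < T) (n : Int) :
    (PySem.List.pyRange 0 T 1).foldl (fun (t : Int × Int) _ =>
        let q := PySem.Int.floordiv t.2 d
        (t.1 * 10 + q, (t.2 - q * d) * 10)) (0, n)
      = (PySem.Int.floordiv (n * 10 ^ (T-1).toNat) d,
         PySem.Int.mod (n * 10 ^ (T-1).toNat) d * 10) := by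
  have hlen : (PySem.List.pyRange 0 T 1).length = (T-1).toNat + 1 := by
    rw [PySem.List.length_pyRange_one]; omega
  rw [pv_fold_const (fun (t : Int × Int) =>
        let q := PySem.Int.floordiv t.2 d
        (t.1 * 10 + q, (t.2 - q * d) * 10)), hlen]
  have h := pv_inner_iter d hd (T-1).toNat 0 n
  simp only [PySem.Int.floordiv] at h ⊢
  rw [h]
  simp [PySem.Int.mod]
  ring

-- A's outer loop, T > 0 case: k remaining iterations starting at index i
lemma pv_A_loop (d p T : Int) (hd : d ≠ 0) (hT : 0 < T) (hp : p = 10 ^ (T-1).toNat) :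
    ∀ (k : Nat) (i : Int), 0 ≤ i → ∀ (acc : List Int), acc.length = i.toNat → ∀ (n : Int),
      (PySem.List.pyRange i (i + k) 1).foldl (fun (s : List Int × Int) j =>
        let inner := (PySem.List.pyRange 0 T 1).foldl (fun (t : Int × Int) _ =>
            let q := PySem.Int.floordiv t.2 d
            (t.1 * 10 + q, (t.2 - q * d) * 10)) (PySem.List.pyGetD s.1 j 0, s.2)
        (s.1.set j.toNat inner.1, inner.2)) (acc ++ List.replicate k 0, n)
      = (acc ++ pvSpine d p k n, pvCarry d p k n) := by
  intro k
  induction k with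
  | zero =>
    intro i hi acc hacc n
    rw [PySem.List.pyRange_one_eq_nil (a := i) (b := i + ((0:Nat) : Int)) (by simp)]
    simp [pvSpine, pvCarry]
  | succ k ih =>
    intro i hi acc hacc n
    rw [PySem.List.pyRange_one_cons (a := i) (b := i + ((k+1 : Nat) : Int)) (by push_cast; omega)]
    have hget : PySem.List.pyGetD (acc ++ List.replicate (k+1) (0:Int)) i 0 = 0 := by
      rw [PySem.List.pyGetD_eq_getElem _ _ hi (by simp; omega)]
      rw [List.getElem_append_right (by omega)]
      simp
    simp only [List.foldl_cons]
    rw [hget, pv_inner_result d T hd hT n, ← hp]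
    have hset : (acc ++ List.replicate (k+1) (0:Int)).set i.toNat (PySem.Int.floordiv (n * p) d)
        = (acc ++ [PySem.Int.floordiv (n * p) d]) ++ List.replicate k 0 := by
      rw [List.set_append_right _ _ (by omega)]
      simp [hacc, List.replicate_succ]
    rw [hset]
    have hb : i + ((k+1 : Nat) : Int) = (i+1) + (k : Nat) := by push_cast; ring
    rw [hb, ih (i+1) (by omega) _ (by simp [hacc]; omega) _]
    simp [pvSpine, pvCarry]

-- B's loop over any index list
lemma pv_B_loop (d p : Int) :
    ∀ (l : List Int) (acc : List Int) (n : Int),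
      l.foldl (fun (s : List Int × Int) _ =>
        (s.1 ++ [PySem.Int.floordiv (s.2 * p) d], PySem.Int.mod (s.2 * p) d * 10)) (acc, n)
      = (acc ++ pvSpine d p l.length n, pvCarry d p l.length n)
  | [], acc, n => by simp [pvSpine, pvCarry]
  | x :: xs, acc, n => by
    simp only [List.foldl, pv_B_loop d p xs, List.length_cons, pvSpine, pvCarry]
    simp

-- A with T ≤ 0: every step writes back the 0 it read, so the zero list is untouched
lemma pv_A_T_nonpos (m : Nat) :
    ∀ (l : List Int) (n : Int), (∀ i ∈ l, 0 ≤ i ∧ i.toNat < m) →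
      (l.foldl (fun (s : List Int × Int) j =>
          (s.1.set j.toNat (PySem.List.pyGetD s.1 j 0), s.2)) (List.replicate m 0, n)).1
        = List.replicate m (0 : Int) := by
  intro l
  induction l with
  | nil => intro n _; rfl
  | cons j l ih =>
    intro n h
    have hj := h j (List.mem_cons_self ..)
    have hget : PySem.List.pyGetD (List.replicate m (0:Int)) j 0 = 0 := by
      rw [PySem.List.pyGetD_eq_getElem _ _ hj.1 (by simp; omega)]
      simp
    simp only [List.foldl_cons]
    rw [hget, show (List.replicate m (0:Int)).set j.toNat 0 = List.replicate m 0 by simp]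
    exact ih _ (fun i hi => h i (List.mem_cons_of_mem _ hi))

-- ===== VERDICT (by name: the statement is the Claim_ definition above) =====
theorem unSur_spec : Claim_equal_unSur := by
  intro d D T hDom hPre
  unfold Spec_unSur unSur unSur_alt
  by_cases hT : T ≤ 0
  · simp only [if_pos (Or.inl hT), PySem.List.pyRange_one_eq_nil (a := (0:Int)) hT, List.foldl_nil]
    exact pv_A_T_nonpos D.toNat (PySem.List.pyRange 0 D 1) 1
      (fun i hi => by
        have := (PySem.List.mem_pyRange_one).1 hi
        constructor
        · exact this.1
        · omega)
  · simp only []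
    by_cases hD : D ≤ 0
    · rw [if_pos (Or.inr hD), PySem.List.pyRange_one_eq_nil hD]
      simp
    · have hd : d ≠ 0 := by rcases hPre with h | h | h <;> first | exact h | omega
      have hT' : 0 < T := by omega
      have hrange : PySem.List.pyRange 0 D 1 = PySem.List.pyRange 0 (0 + (D.toNat : Nat)) 1 := by
        congr 1
        omega
      have hA := pv_A_loop d (10 ^ (T-1).toNat) T hd hT' rfl D.toNat 0 le_rfl [] rfl 1
      have hB := pv_B_loop d (10 ^ (T-1).toNat) (PySem.List.pyRange 0 D 1) [] 1
      simp only [List.nil_append] at hA hB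
      rw [hrange, hA]
      rw [hrange] at hB
      rw [hB]
      rw [PySem.List.length_pyRange_one]
      rw [show ((0:Int) + (D.toNat : Int) - 0).toNat = D.toNat by omega]
      rw [if_neg (by omega)]
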